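-- pv_equiv track=rewrite | github.com/josinger/7529-TeoriaDeAlgoritmos | TP2/main.py | orden_de_la_mejor_carta_posible
-- ===== SOURCE A (Python) =====
-- def orden_de_la_mejor_carta_posible(cartas):
--   pos_calculadas = {}
--   suma_parcial = {}
--   n = len(cartas)
--
--   for i in range(0,n):
--     pos_calculadas[(i,i)] = i
--     suma_parcial[(i,i)] = cartas[i]
--
--   for i in range(0, n-1):
--     pos_calculadas[(i,i+1)] = (i if cartas[i] > cartas[i+1] else i+1)
--     suma_parcial[(i,i+1)] = max(cartas[i], cartas[i+1])
--
--   for dif in range(2, n):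
--     for j in range(dif, n):
--       i = j - dif
--       seleccion_primera = cartas[i] + min(suma_parcial[(i+2,j)], suma_parcial[(i+1,j-1)])
--       seleccion_ultima = cartas[j] + min(suma_parcial[(i+1,j-1)], suma_parcial[(i,j-2)])
--
--       if(seleccion_primera > seleccion_ultima):
--         pos_calculadas[(i,j)] = i
--         suma_parcial[(i,j)] = seleccion_primera
--       else:
--         pos_calculadas[(i,j)] = j
--         suma_parcial[(i,j)] = seleccion_ultima
--   return pos_calculadas
-- ===== SOURCE B (Python) =====
-- def orden_de_la_mejor_carta_posible(cartas):
--   pos_calculadas = {}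
--   suma_parcial = {}
--
--   def mejor(i, j):
--     if (i, j) in suma_parcial:
--       return suma_parcial[(i, j)]
--     if j == i:
--       pos, s = i, cartas[i]
--     elif j == i + 1:
--       pos, s = (i, cartas[i]) if cartas[i] > cartas[i + 1] else (i + 1, cartas[i + 1])
--     else:
--       seleccion_primera = cartas[i] + min(mejor(i + 2, j), mejor(i + 1, j - 1))
--       seleccion_ultima = cartas[j] + min(mejor(i + 1, j - 1), mejor(i, j - 2))
--       pos, s = (i, seleccion_primera) if seleccion_primera > seleccion_ultima else (j, seleccion_ultima)
--     pos_calculadas[(i, j)] = pos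
--     suma_parcial[(i, j)] = s
--     return s
--
--   n = len(cartas)
--   for dif in range(n):
--     for i in range(n - dif):
--       mejor(i, i + dif)
--   return pos_calculadas
-- ===== Notes on version B (the rewrite author's own statement) =====
-- stated objective: alternative
-- what changed: Replaces A's three bottom-up staged loops that fill the two (i,j)-keyed tables diagonal by diagonal with a top-down memoized recursive helper mejor(i,j) (base cases j==i and j==i+1, recursive case consulting the memo) driven by a loop that requests every subinterval; the tables are filled on demand by the recursion instead of by explicit staged iteration.
import Mathlib
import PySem

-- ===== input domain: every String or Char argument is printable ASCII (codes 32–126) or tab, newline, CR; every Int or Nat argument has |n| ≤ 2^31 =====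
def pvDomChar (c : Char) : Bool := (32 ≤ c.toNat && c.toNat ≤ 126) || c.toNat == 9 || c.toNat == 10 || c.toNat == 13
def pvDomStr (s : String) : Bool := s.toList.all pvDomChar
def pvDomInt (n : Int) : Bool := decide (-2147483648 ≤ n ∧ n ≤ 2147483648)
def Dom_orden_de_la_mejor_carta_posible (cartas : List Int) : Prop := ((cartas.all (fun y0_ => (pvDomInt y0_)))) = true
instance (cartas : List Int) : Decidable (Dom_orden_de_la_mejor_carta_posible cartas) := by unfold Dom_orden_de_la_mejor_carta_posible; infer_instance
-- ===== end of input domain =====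

-- B replaces A's three bottom-up staged loops by a top-down memoized recursive helper
-- mejor(i,j) driven by a loop requesting every subinterval; the tables fill on demand.

-- ===== PORT A =====
-- first loop: pos_calculadas[(i,i)] = i; suma_parcial[(i,i)] = cartas[i]
def pvA_loop1 (cartas : List Int) :
    PySem.Dict (Int × Int) Int × PySem.Dict (Int × Int) Int :=
  (PySem.List.pyRange 0 (cartas.length : Int) 1).foldl
    (fun st i => (st.1.insert (i, i) i, st.2.insert (i, i) (PySem.List.pyGetD cartas i 0)))
    (PySem.Dict.empty, PySem.Dict.empty)

-- second loop: the adjacent pairs (i, i+1)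
def pvA_loop2 (cartas : List Int)
    (st0 : PySem.Dict (Int × Int) Int × PySem.Dict (Int × Int) Int) :
    PySem.Dict (Int × Int) Int × PySem.Dict (Int × Int) Int :=
  (PySem.List.pyRange 0 ((cartas.length : Int) - 1) 1).foldl
    (fun st i =>
      (st.1.insert (i, i + 1)
        (if PySem.List.pyGetD cartas i 0 > PySem.List.pyGetD cartas (i + 1) 0 then i else i + 1),
       st.2.insert (i, i + 1)
        (max (PySem.List.pyGetD cartas i 0) (PySem.List.pyGetD cartas (i + 1) 0))))
    st0

-- body of the inner loop over j for a fixed dif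
def pvA_body (cartas : List Int) (dif : Int)
    (st : PySem.Dict (Int × Int) Int × PySem.Dict (Int × Int) Int) (j : Int) :
    PySem.Dict (Int × Int) Int × PySem.Dict (Int × Int) Int :=
  let i := j - dif
  let sp := PySem.List.pyGetD cartas i 0 +
    min (st.2.getD (i + 2, j) 0) (st.2.getD (i + 1, j - 1) 0)
  let su := PySem.List.pyGetD cartas j 0 +
    min (st.2.getD (i + 1, j - 1) 0) (st.2.getD (i, j - 2) 0)
  if sp > su then (st.1.insert (i, j) i, st.2.insert (i, j) sp)
  else (st.1.insert (i, j) j, st.2.insert (i, j) su)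

def orden_de_la_mejor_carta_posible (cartas : List Int) : List (Int × Int × Int) :=
  let n : Int := cartas.length
  let st := (PySem.List.pyRange 2 n 1).foldl
    (fun st dif => (PySem.List.pyRange dif n 1).foldl (pvA_body cartas dif) st)
    (pvA_loop2 cartas (pvA_loop1 cartas))
  st.1.items.map (fun p => (p.1.1, p.1.2, p.2))

-- ===== PORT B =====
-- mejor(i, j): the memoized recursion of Source B, with the two mutated dicts
-- (pos_calculadas, suma_parcial) threaded as explicit state; the Nat argument d is the
-- difference j - i (every reachable Python call has j ≥ i, and the recursion steps d → d-2),
-- so j := i + d and the structural recursion on d is exactly Python's recursion on (i, j).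
def pvMejor (cartas : List Int) :
    Nat → Int → PySem.Dict (Int × Int) Int × PySem.Dict (Int × Int) Int →
    Int × (PySem.Dict (Int × Int) Int × PySem.Dict (Int × Int) Int)
  | d, i, st =>
    let j : Int := i + (d : Int)
    if st.2.contains (i, j) then (st.2.getD (i, j) 0, st)
    else
      match d with
      | 0 =>
        let s := PySem.List.pyGetD cartas i 0
        (s, (st.1.insert (i, j) i, st.2.insert (i, j) s))
      | 1 =>
        let ps : Int × Int :=
          if PySem.List.pyGetD cartas i 0 > PySem.List.pyGetD cartas (i + 1) 0
          then (i, PySem.List.pyGetD cartas i 0) else (i + 1, PySem.List.pyGetD cartas (i + 1) 0)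
        (ps.2, (st.1.insert (i, j) ps.1, st.2.insert (i, j) ps.2))
      | k + 2 =>
        let r1 := pvMejor cartas k (i + 2) st
        let r2 := pvMejor cartas k (i + 1) r1.2
        let sp := PySem.List.pyGetD cartas i 0 + min r1.1 r2.1
        let r3 := pvMejor cartas k (i + 1) r2.2
        let r4 := pvMejor cartas k i r3.2
        let su := PySem.List.pyGetD cartas j 0 + min r3.1 r4.1
        let ps : Int × Int := if sp > su then (i, sp) else (j, su)
        (ps.2, (r4.2.1.insert (i, j) ps.1, r4.2.2.insert (i, j) ps.2))

-- driver: for dif in range(n): for i in range(n - dif): mejor(i, i + dif); return pos_calculadas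
def orden_de_la_mejor_carta_posible_alt (cartas : List Int) : List (Int × Int × Int) :=
  let n : Int := cartas.length
  let st := (PySem.List.pyRange 0 n 1).foldl
    (fun st dif => (PySem.List.pyRange 0 (n - dif) 1).foldl
      (fun st i => (pvMejor cartas dif.toNat i st).2) st)
    (PySem.Dict.empty, PySem.Dict.empty)
  st.1.items.map (fun p => (p.1.1, p.1.2, p.2))

-- ===== PRECONDITION & SPEC =====
def Spec_orden_de_la_mejor_carta_posible (cartas : List Int) (out : List (Int × Int × Int)) : Prop := out = orden_de_la_mejor_carta_posible_alt cartas
instance (cartas : List Int) (out : List (Int × Int × Int)) : Decidable (Spec_orden_de_la_mejor_carta_posible cartas out) := by unfold Spec_orden_de_la_mejor_carta_posible; infer_instance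

-- ===== CLAIM (what is proved, stated in full; the proofs are below) =====
def Claim_equal_orden_de_la_mejor_carta_posible : Prop := ∀ (cartas : List Int), Dom_orden_de_la_mejor_carta_posible cartas → Spec_orden_de_la_mejor_carta_posible cartas (orden_de_la_mejor_carta_posible cartas)

-- ===== LEMMAS AND PROOFS =====

-- the ideal diagonal rows, defined by two-step recursion on d
def pvRow (cartas : List Int) : Nat → List (Int × Int)
  | 0 => PySem.List.enumerate cartas 0
  | 1 => (PySem.List.pyRange 0 ((cartas.length : Int) - 1) 1).map (fun i =>
      if PySem.List.pyGetD cartas i 0 > PySem.List.pyGetD cartas (i + 1) 0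
      then (i, PySem.List.pyGetD cartas i 0) else (i + 1, PySem.List.pyGetD cartas (i + 1) 0))
  | (d + 2) => (PySem.List.pyRange 0 ((cartas.length : Int) - ((d : Int) + 2)) 1).map
      (fun i =>
        let sp := PySem.List.pyGetD cartas i 0 +
          min ((pvRow cartas d).getD (i + 2).toNat (0, 0)).2
              ((pvRow cartas d).getD (i + 1).toNat (0, 0)).2
        let su := PySem.List.pyGetD cartas (i + (d : Int) + 2) 0 +
          min ((pvRow cartas d).getD (i + 1).toNat (0, 0)).2
              ((pvRow cartas d).getD i.toNat (0, 0)).2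
        if sp > su then (i, sp) else (i + (d : Int) + 2, su))

-- key/value pairs contributed by row d (f selects position or sum)
def pvRowKV (f : Int × Int → Int) (cartas : List Int) (d : Nat) : List ((Int × Int) × Int) :=
  (PySem.List.enumerate (pvRow cartas d) 0).map (fun ip => ((ip.1, ip.1 + (d : Int)), f ip.2))

def pvKV (f : Int × Int → Int) (cartas : List Int) (m : Nat) : List ((Int × Int) × Int) :=
  (List.range m).flatMap (pvRowKV f cartas)


-- --- basic facts about pvRow / pvRowKV / pvKV ---

theorem pvRow_length (cartas : List Int) (d : Nat) :
    (pvRow cartas d).length = ((cartas.length : Int) - (d : Int)).toNat := by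
  match d with
  | 0 => simp [pvRow, PySem.List.length_enumerate]
  | 1 => simp [pvRow, PySem.List.length_pyRange_one]
  | d + 2 =>
    simp only [pvRow, List.length_map, PySem.List.length_pyRange_one]
    congr 1
    push_cast
    ring

theorem pvRow_length' (cartas : List Int) (d : Nat) (h : d ≤ cartas.length) :
    (pvRow cartas d).length = cartas.length - d := by
  rw [pvRow_length]; omega

theorem pvRow_getD_two (cartas : List Int) (d : Nat) (t : Nat)
    (h : t + (d + 2) < cartas.length) :
    (pvRow cartas (d + 2)).getD t (0, 0)
      = (if PySem.List.pyGetD cartas (t : Int) 0 +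
            min ((pvRow cartas d).getD (t + 2) (0, 0)).2 ((pvRow cartas d).getD (t + 1) (0, 0)).2
          > PySem.List.pyGetD cartas ((t : Int) + (d : Int) + 2) 0 +
            min ((pvRow cartas d).getD (t + 1) (0, 0)).2 ((pvRow cartas d).getD t (0, 0)).2
         then (((t : Int)), PySem.List.pyGetD cartas (t : Int) 0 +
            min ((pvRow cartas d).getD (t + 2) (0, 0)).2 ((pvRow cartas d).getD (t + 1) (0, 0)).2)
         else (((t : Int)) + (d : Int) + 2, PySem.List.pyGetD cartas ((t : Int) + (d : Int) + 2) 0 +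
            min ((pvRow cartas d).getD (t + 1) (0, 0)).2 ((pvRow cartas d).getD t (0, 0)).2)) := by
  have hlen : t < (pvRow cartas (d + 2)).length := by
    rw [pvRow_length' _ _ (by omega)]; omega
  rw [List.getD_eq_getElem _ _ hlen]
  simp only [pvRow] at hlen ⊢
  rw [List.getElem_map, PySem.List.getElem_pyRange_one]
  simp only [zero_add]
  rw [show ((t : Int) + 2).toNat = t + 2 by omega, show ((t : Int) + 1).toNat = t + 1 by omega,
    show ((t : Int)).toNat = t by omega]

theorem pvRowKV_length (f : Int × Int → Int) (cartas : List Int) (d : Nat) :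
    (pvRowKV f cartas d).length = (pvRow cartas d).length := by
  simp [pvRowKV, PySem.List.length_enumerate]

theorem pvRowKV_getElem (f : Int × Int → Int) (cartas : List Int) (d : Nat) (i : Nat)
    (h : i < (pvRowKV f cartas d).length) :
    (pvRowKV f cartas d)[i]
      = (((i : Int), (i : Int) + (d : Int)), f ((pvRow cartas d)[i]'(by
          rwa [pvRowKV_length] at h))) := by
  simp only [pvRowKV] at h ⊢
  rw [List.getElem_map, PySem.List.getElem_enumerate]
  norm_num

theorem pvRowKV_key (f : Int × Int → Int) (cartas : List Int) (d : Nat)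
    {kv : (Int × Int) × Int} (h : kv ∈ pvRowKV f cartas d) :
    ∃ i : Nat, i < (pvRow cartas d).length ∧ kv.1 = ((i : Int), (i : Int) + (d : Int)) := by
  rcases List.mem_map.1 h with ⟨ip, hip, rfl⟩
  rcases (PySem.List.mem_enumerate_iff _ _ _).1 hip with ⟨k, hk, rfl⟩
  exact ⟨k, hk, by norm_num⟩

theorem pvKV_key (f : Int × Int → Int) (cartas : List Int) (m : Nat)
    {kv : (Int × Int) × Int} (h : kv ∈ pvKV f cartas m) :
    ∃ d i : Nat, d < m ∧ i < (pvRow cartas d).length ∧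
      kv.1 = ((i : Int), (i : Int) + (d : Int)) := by
  rcases List.mem_flatMap.1 h with ⟨d, hd, hkv⟩
  rcases pvRowKV_key f cartas d hkv with ⟨i, hi, hk⟩
  exact ⟨d, i, List.mem_range.1 hd, hi, hk⟩

theorem pvKV_succ (f : Int × Int → Int) (cartas : List Int) (m : Nat) :
    pvKV f cartas (m + 1) = pvKV f cartas m ++ pvRowKV f cartas m := by
  simp [pvKV, List.range_succ]

-- extending the taken prefix of a row by one cell
theorem pvTake_succ (f : Int × Int → Int) (cartas : List Int) (m t : Nat)
    (ht : t < (pvRow cartas m).length) :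
    (pvRowKV f cartas m).take (t + 1)
      = (pvRowKV f cartas m).take t
        ++ [((((t : Int)), ((t : Int)) + ((m : Int))), f ((pvRow cartas m).getD t (0, 0)))] := by
  have htlen : t < (pvRowKV f cartas m).length := by rw [pvRowKV_length]; omega
  rw [List.take_succ, List.getElem?_eq_getElem htlen, pvRowKV_getElem _ _ _ _ htlen,
    ← List.getD_eq_getElem _ (((0 : Int), (0 : Int))) ht]
  rfl

-- a key of difference m and first component t is absent from a dict with the canonical items
theorem pv_not_contains (f : Int × Int → Int) (cartas : List Int) (m t : Nat)
    (pos : PySem.Dict (Int × Int) Int)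
    (hitems : pos.items = pvKV f cartas m ++ (pvRowKV f cartas m).take t) :
    pos.contains ((t : Int), (t : Int) + (m : Int)) = false := by
  rw [PySem.Dict.contains_eq_decide_mem_keys]
  simp only [decide_eq_false_iff_not]
  intro hmem
  have hmem' : ((t : Int), (t : Int) + (m : Int)) ∈ pos.items.map (·.1) := by
    simpa [PySem.Dict.keys] using hmem
  rw [hitems, List.map_append] at hmem'
  rcases List.mem_append.1 hmem' with h | h
  · rcases List.mem_map.1 h with ⟨kv, hkv, hk⟩
    rcases pvKV_key _ _ _ hkv with ⟨d, i, hdm, _, hk'⟩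
    rw [hk'] at hk
    have h1 : ((i : Int)) = (t : Int) := congrArg Prod.fst hk
    have h2 : ((i : Int)) + (d : Int) = (t : Int) + (m : Int) := congrArg Prod.snd hk
    omega
  · rcases List.mem_map.1 h with ⟨kv, hkv, hk⟩
    rcases List.mem_iff_getElem.1 hkv with ⟨j, hj, hkv'⟩
    have hj' : j < (pvRowKV f cartas m).length := by
      have := List.length_take (i := t) (l := pvRowKV f cartas m)
      omega
    have hjt : j < t := by
      have := List.length_take (i := t) (l := pvRowKV f cartas m)
      omega
    rw [List.getElem_take] at hkv'
    subst hkv'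
    rw [pvRowKV_getElem _ _ _ _ hj'] at hk
    have h1 : ((j : Int)) = (t : Int) := congrArg Prod.fst hk
    omega

-- getD from the canonical items (first-match lookup; the keys are pairwise distinct)
-- --- the loop invariant shared by both ports ---
-- (st.1 = pos_calculadas, st.2 = suma_parcial; rows < m complete, row m filled up to t)

def pvInv (cartas : List Int) (m t : Nat)
    (st : PySem.Dict (Int × Int) Int × PySem.Dict (Int × Int) Int) : Prop :=
  st.1.items = pvKV Prod.fst cartas m ++ (pvRowKV Prod.fst cartas m).take t
  ∧ st.2.items = pvKV Prod.snd cartas m ++ (pvRowKV Prod.snd cartas m).take t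

-- --- rows 0 and 1 as explicit maps, and the canonical keys are pairwise distinct ---

theorem pvRowKV_zero (f : Int × Int → Int) (cartas : List Int) :
    pvRowKV f cartas 0
      = (PySem.List.pyRange 0 (cartas.length : Int) 1).map
          (fun i => ((i, i), f (i, PySem.List.pyGetD cartas i 0))) := by
  apply List.ext_getElem
  · simp [pvRowKV_length, pvRow_length, PySem.List.length_pyRange_one]
  · intro i h1 h2
    have hrow : i < (pvRow cartas 0).length := by rwa [pvRowKV_length] at h1
    have hin : i < cartas.length := by have := pvRow_length cartas 0; omega
    have he : (pvRow cartas 0)[i]'hrow = ((i : Int), cartas[i]'hin) := by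
      simp [pvRow, PySem.List.getElem_enumerate]
    rw [pvRowKV_getElem _ _ _ _ h1, List.getElem_map, PySem.List.getElem_pyRange_one, he]
    simp only [zero_add]
    rw [PySem.List.pyGetD_natCast, List.getD_eq_getElem _ _ hin]
    norm_num

theorem pv_row1_getElem (cartas : List Int) (i : Nat) (h : i < (pvRow cartas 1).length) :
    (pvRow cartas 1)[i]
      = (if PySem.List.pyGetD cartas ((i : Int)) 0 > PySem.List.pyGetD cartas ((i : Int) + 1) 0
         then (((i : Int)), PySem.List.pyGetD cartas ((i : Int)) 0)
         else (((i : Int)) + 1, PySem.List.pyGetD cartas ((i : Int) + 1) 0)) := by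
  simp only [pvRow] at h ⊢
  rw [List.getElem_map, PySem.List.getElem_pyRange_one]
  norm_num

theorem pvRowKV_one (f : Int × Int → Int) (cartas : List Int) :
    pvRowKV f cartas 1
      = (PySem.List.pyRange 0 ((cartas.length : Int) - 1) 1).map (fun i => ((i, i + 1),
          f (if PySem.List.pyGetD cartas i 0 > PySem.List.pyGetD cartas (i + 1) 0
             then (i, PySem.List.pyGetD cartas i 0)
             else (i + 1, PySem.List.pyGetD cartas (i + 1) 0)))) := by
  apply List.ext_getElem
  · simp [pvRowKV_length, pvRow_length, PySem.List.length_pyRange_one]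
  · intro i h1 h2
    have hrow : i < (pvRow cartas 1).length := by rwa [pvRowKV_length] at h1
    rw [pvRowKV_getElem _ _ _ _ h1, List.getElem_map, PySem.List.getElem_pyRange_one,
      pv_row1_getElem _ _ hrow]
    simp only [zero_add, one_mul]
    split_ifs <;> norm_num

theorem pv_rowkeys_nodup (f : Int × Int → Int) (cartas : List Int) (d : Nat) :
    ((pvRowKV f cartas d).map (·.1)).Nodup := by
  rw [List.nodup_iff_getElem?_ne_getElem?]
  intro i j hij hj
  rw [List.length_map] at hj
  have hi : i < (pvRowKV f cartas d).length := by omega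
  rw [List.getElem?_eq_getElem (by simpa using hi),
    List.getElem?_eq_getElem (by simpa using hj)]
  simp only [List.getElem_map, pvRowKV_getElem _ _ _ _ hi, pvRowKV_getElem _ _ _ _ hj]
  intro hc
  rw [Option.some_inj] at hc
  have h1 : ((i : Int)) = (j : Int) := congrArg Prod.fst hc
  omega

theorem pv_kvkeys_nodup (f : Int × Int → Int) (cartas : List Int) :
    ∀ m : Nat, ((pvKV f cartas m).map (·.1)).Nodup := by
  intro m
  induction m with
  | zero => simp [pvKV]
  | succ m ih =>
    rw [pvKV_succ, List.map_append]
    refine List.Nodup.append ih (pv_rowkeys_nodup f cartas m) ?_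
    intro k hk1 hk2
    rcases List.mem_map.1 hk1 with ⟨kv1, hkv1, rfl⟩
    rcases List.mem_map.1 hk2 with ⟨kv2, hkv2, he⟩
    rcases pvKV_key f cartas m hkv1 with ⟨d1, i1, hd1, _, hk1'⟩
    rcases pvRowKV_key f cartas m hkv2 with ⟨i2, _, hk2'⟩
    rw [hk1', hk2'] at he
    have e1 : ((i2 : Int)) = (i1 : Int) := congrArg Prod.fst he
    have e2 : ((i2 : Int)) + (m : Int) = (i1 : Int) + (d1 : Int) := congrArg Prod.snd he
    omega

theorem pv_keys_nodup (f : Int × Int → Int) (cartas : List Int) (m t : Nat) :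
    ((pvKV f cartas m ++ (pvRowKV f cartas m).take t).map (·.1)).Nodup := by
  rw [List.map_append]
  refine List.Nodup.append (pv_kvkeys_nodup f cartas m)
    (((pv_rowkeys_nodup f cartas m).sublist ((List.take_sublist _ _).map _))) ?_
  intro k hk1 hk2
  rcases List.mem_map.1 hk1 with ⟨kv1, hkv1, rfl⟩
  rcases List.mem_map.1 hk2 with ⟨kv2, hkv2, he⟩
  rcases pvKV_key f cartas m hkv1 with ⟨d1, i1, hd1, _, hk1'⟩
  rcases pvRowKV_key f cartas m (List.mem_of_mem_take hkv2) with ⟨i2, _, hk2'⟩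
  rw [hk1', hk2'] at he
  have e1 : ((i2 : Int)) = (i1 : Int) := congrArg Prod.fst he
  have e2 : ((i2 : Int)) + (m : Int) = (i1 : Int) + (d1 : Int) := congrArg Prod.snd he
  omega

-- the canonical (key, value) pair of cell (i, i+d) is among the items
theorem pv_mem_canonical (f : Int × Int → Int) (cartas : List Int) (m t : Nat) (d i : Nat)
    (hcond : (d < m ∧ i + d < cartas.length) ∨ (d = m ∧ i < t ∧ t + m ≤ cartas.length)) :
    ((((i : Int)), ((i : Int)) + ((d : Int))), f ((pvRow cartas d).getD i (0, 0)))
      ∈ pvKV f cartas m ++ (pvRowKV f cartas m).take t := by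
  have hlen : i < (pvRow cartas d).length := by
    rcases hcond with ⟨hdm, hin⟩ | ⟨heq, hit, htn⟩
    · rw [pvRow_length' _ _ (by omega)]; omega
    · rw [pvRow_length' _ _ (by omega)]; omega
  have hlen' : i < (pvRowKV f cartas d).length := by rw [pvRowKV_length]; omega
  have hval : (pvRowKV f cartas d)[i]
      = ((((i : Int)), ((i : Int)) + ((d : Int))), f ((pvRow cartas d).getD i (0, 0))) := by
    rw [pvRowKV_getElem _ _ _ _ hlen', List.getD_eq_getElem _ _ hlen]
  rcases hcond with ⟨hdm, _⟩ | ⟨heq, hit, _⟩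
  · refine List.mem_append.2 (Or.inl ?_)
    exact List.mem_flatMap.2 ⟨d, List.mem_range.2 hdm, hval ▸ List.getElem_mem hlen'⟩
  · subst heq
    refine List.mem_append.2 (Or.inr ?_)
    have hlent : i < ((pvRowKV f cartas d).take t).length := by rw [List.length_take]; omega
    have : ((pvRowKV f cartas d).take t)[i]
        = ((((i : Int)), ((i : Int)) + ((d : Int))), f ((pvRow cartas d).getD i (0, 0))) := by
      rw [List.getElem_take, hval]
    exact this ▸ List.getElem_mem hlent

-- getD on a dict holding the canonical sums
theorem pv_getD_canonical (cartas : List Int) (m t : Nat)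
    (suma : PySem.Dict (Int × Int) Int)
    (hitems : suma.items = pvKV Prod.snd cartas m ++ (pvRowKV Prod.snd cartas m).take t)
    (d i : Nat)
    (hcond : (d < m ∧ i + d < cartas.length) ∨ (d = m ∧ i < t ∧ t + m ≤ cartas.length)) :
    suma.getD ((i : Int), (i : Int) + (d : Int)) 0 = ((pvRow cartas d).getD i (0, 0)).2 := by
  have hmem : ((((i : Int)), ((i : Int)) + ((d : Int))), ((pvRow cartas d).getD i (0, 0)).2)
      ∈ suma.items := by
    rw [hitems]; exact pv_mem_canonical Prod.snd cartas m t d i hcond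
  have hnd : suma.keys.Nodup := by
    show (suma.items.map (·.1)).Nodup
    rw [hitems]; exact pv_keys_nodup Prod.snd cartas m t
  exact PySem.Dict.getD_of_mem_items suma hmem hnd 0

-- contains on a dict holding the canonical items
theorem pv_contains_canonical (f : Int × Int → Int) (cartas : List Int) (m t : Nat)
    (suma : PySem.Dict (Int × Int) Int)
    (hitems : suma.items = pvKV f cartas m ++ (pvRowKV f cartas m).take t)
    (d i : Nat)
    (hcond : (d < m ∧ i + d < cartas.length) ∨ (d = m ∧ i < t ∧ t + m ≤ cartas.length)) :
    suma.contains ((i : Int), (i : Int) + (d : Int)) = true := by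
  rw [PySem.Dict.contains_eq_decide_mem_keys]
  simp only [decide_eq_true_eq]
  show ((i : Int), (i : Int) + (d : Int)) ∈ suma.items.map (·.1)
  rw [hitems]
  exact List.mem_map.2 ⟨_, pv_mem_canonical f cartas m t d i hcond, rfl⟩

-- --- the state after A's two base loops ---

def pvPos1 (cartas : List Int) : PySem.Dict (Int × Int) Int :=
  (PySem.List.pyRange 0 (cartas.length : Int) 1).foldl
    (fun d i => d.insert (i, i) i) PySem.Dict.empty

def pvSuma1 (cartas : List Int) : PySem.Dict (Int × Int) Int :=
  (PySem.List.pyRange 0 (cartas.length : Int) 1).foldl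
    (fun d i => d.insert (i, i) (PySem.List.pyGetD cartas i 0)) PySem.Dict.empty

def pvPos2 (cartas : List Int) : PySem.Dict (Int × Int) Int :=
  (PySem.List.pyRange 0 ((cartas.length : Int) - 1) 1).foldl
    (fun d i => d.insert (i, i + 1)
      (if PySem.List.pyGetD cartas i 0 > PySem.List.pyGetD cartas (i + 1) 0 then i else i + 1))
    (pvPos1 cartas)

def pvSuma2 (cartas : List Int) : PySem.Dict (Int × Int) Int :=
  (PySem.List.pyRange 0 ((cartas.length : Int) - 1) 1).foldl
    (fun d i => d.insert (i, i + 1)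
      (max (PySem.List.pyGetD cartas i 0) (PySem.List.pyGetD cartas (i + 1) 0)))
    (pvSuma1 cartas)

theorem pvA_split (cartas : List Int) :
    pvA_loop2 cartas (pvA_loop1 cartas) = (pvPos2 cartas, pvSuma2 cartas) := by
  unfold pvA_loop2 pvA_loop1 pvPos2 pvSuma2 pvPos1 pvSuma1
  have h1 := PySem.List.foldl_prod_mk
    (f := fun (d : PySem.Dict (Int × Int) Int) (i : Int) => d.insert (i, i) i)
    (g := fun (d : PySem.Dict (Int × Int) Int) (i : Int) =>
      d.insert (i, i) (PySem.List.pyGetD cartas i 0))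
    (l := PySem.List.pyRange 0 (cartas.length : Int) 1)
    (a := PySem.Dict.empty) (b := PySem.Dict.empty)
  rw [h1]
  have h2 := PySem.List.foldl_prod_mk
    (f := fun (d : PySem.Dict (Int × Int) Int) (i : Int) => d.insert (i, i + 1)
      (if PySem.List.pyGetD cartas i 0 > PySem.List.pyGetD cartas (i + 1) 0 then i else i + 1))
    (g := fun (d : PySem.Dict (Int × Int) Int) (i : Int) => d.insert (i, i + 1)
      (max (PySem.List.pyGetD cartas i 0) (PySem.List.pyGetD cartas (i + 1) 0)))
    (l := PySem.List.pyRange 0 ((cartas.length : Int) - 1) 1)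
    (a := List.foldl (fun (d : PySem.Dict (Int × Int) Int) (i : Int) => d.insert (i, i) i)
      PySem.Dict.empty (PySem.List.pyRange 0 (cartas.length : Int) 1))
    (b := List.foldl (fun (d : PySem.Dict (Int × Int) Int) (i : Int) =>
      d.insert (i, i) (PySem.List.pyGetD cartas i 0))
      PySem.Dict.empty (PySem.List.pyRange 0 (cartas.length : Int) 1))
  rw [h2]

-- generic: the two base loops write fresh distinct keys, so items are the maps
theorem pv_loop1_items (cartas : List Int) (v : Int → Int) :
    ((PySem.List.pyRange 0 (cartas.length : Int) 1).foldl
      (fun (d : PySem.Dict (Int × Int) Int) i => d.insert (i, i) (v i)) PySem.Dict.empty).items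
      = (PySem.List.pyRange 0 (cartas.length : Int) 1).map (fun i => ((i, i), v i)) := by
  rw [PySem.Dict.items_foldl_insert_fresh _ (fun i => ((i, i) : Int × Int)) v _
    (fun a _ => by simp) ?nd]
  · rfl
  case nd =>
    refine List.Nodup.map ?_ (PySem.List.nodup_pyRange_one 0 (cartas.length : Int))
    intro a b h
    simpa using h

theorem pv_loop2_items (cartas : List Int) (v w : Int → Int)
    (d1 : PySem.Dict (Int × Int) Int)
    (h1 : d1.items = (PySem.List.pyRange 0 (cartas.length : Int) 1).map (fun i => ((i, i), v i))) :
    ((PySem.List.pyRange 0 ((cartas.length : Int) - 1) 1).foldl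
      (fun (d : PySem.Dict (Int × Int) Int) i => d.insert (i, i + 1) (w i)) d1).items
      = (PySem.List.pyRange 0 (cartas.length : Int) 1).map (fun i => ((i, i), v i))
        ++ (PySem.List.pyRange 0 ((cartas.length : Int) - 1) 1).map
            (fun i => ((i, i + 1), w i)) := by
  rw [PySem.Dict.items_foldl_insert_fresh _ (fun i => ((i, i + 1) : Int × Int)) w _
    ?fresh ?nd, h1]
  case fresh =>
    intro a _
    rw [PySem.Dict.contains_eq_decide_mem_keys]
    simp only [decide_eq_false_iff_not]
    intro hmem
    have hm : ((a, a + 1) : Int × Int) ∈ d1.items.map (·.1) := by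
      simpa [PySem.Dict.keys] using hmem
    rw [h1] at hm
    rcases List.mem_map.1 hm with ⟨x, hx, hk⟩
    rcases List.mem_map.1 hx with ⟨y, hy, rfl⟩
    have ha1 := congrArg Prod.fst hk
    have ha2 := congrArg Prod.snd hk
    simp at ha1 ha2
    omega
  case nd =>
    refine List.Nodup.map ?_ (PySem.List.nodup_pyRange_one 0 ((cartas.length : Int) - 1))
    intro a b h
    simpa using h

theorem pvInv_base (cartas : List Int) (h2 : 2 ≤ cartas.length) :
    pvInv cartas 2 0 (pvA_loop2 cartas (pvA_loop1 cartas)) := by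
  rw [pvA_split]
  have hkv2 : ∀ f : Int × Int → Int,
      pvKV f cartas 2 = pvRowKV f cartas 0 ++ pvRowKV f cartas 1 := by
    intro f
    rw [show (2 : Nat) = 0 + 1 + 1 from rfl, pvKV_succ, pvKV_succ]
    simp [pvKV]
  constructor
  · show (pvPos2 cartas).items = _
    have hp : (pvPos2 cartas).items
        = (PySem.List.pyRange 0 (cartas.length : Int) 1).map (fun i => ((i, i), i))
          ++ (PySem.List.pyRange 0 ((cartas.length : Int) - 1) 1).map
              (fun i => ((i, i + 1),
                if PySem.List.pyGetD cartas i 0 > PySem.List.pyGetD cartas (i + 1) 0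
                then i else i + 1)) :=
      pv_loop2_items cartas (fun i => i) _ (pvPos1 cartas) (pv_loop1_items cartas (fun i => i))
    have e1 : pvRowKV Prod.fst cartas 0
        = (PySem.List.pyRange 0 (cartas.length : Int) 1).map (fun i => ((i, i), i)) := by
      rw [pvRowKV_zero]
    have e2 : pvRowKV Prod.fst cartas 1
        = (PySem.List.pyRange 0 ((cartas.length : Int) - 1) 1).map
            (fun i => ((i, i + 1),
              if PySem.List.pyGetD cartas i 0 > PySem.List.pyGetD cartas (i + 1) 0
              then i else i + 1)) := by
      rw [pvRowKV_one]
      apply List.map_congr_left; intro a _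
      by_cases h : PySem.List.pyGetD cartas a 0 > PySem.List.pyGetD cartas (a + 1) 0
      · rw [if_pos h, if_pos h]
      · rw [if_neg h, if_neg h]
    rw [hp, List.take_zero, List.append_nil, hkv2, e1, e2]
  · show (pvSuma2 cartas).items = _
    have hp : (pvSuma2 cartas).items
        = (PySem.List.pyRange 0 (cartas.length : Int) 1).map
            (fun i => ((i, i), PySem.List.pyGetD cartas i 0))
          ++ (PySem.List.pyRange 0 ((cartas.length : Int) - 1) 1).map
              (fun i => ((i, i + 1),
                max (PySem.List.pyGetD cartas i 0) (PySem.List.pyGetD cartas (i + 1) 0))) :=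
      pv_loop2_items cartas (fun i => PySem.List.pyGetD cartas i 0) _ (pvSuma1 cartas)
        (pv_loop1_items cartas (fun i => PySem.List.pyGetD cartas i 0))
    have e1 : pvRowKV Prod.snd cartas 0
        = (PySem.List.pyRange 0 (cartas.length : Int) 1).map
            (fun i => ((i, i), PySem.List.pyGetD cartas i 0)) := by
      rw [pvRowKV_zero]
    have e2 : pvRowKV Prod.snd cartas 1
        = (PySem.List.pyRange 0 ((cartas.length : Int) - 1) 1).map
            (fun i => ((i, i + 1),
              max (PySem.List.pyGetD cartas i 0) (PySem.List.pyGetD cartas (i + 1) 0))) := by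
      rw [pvRowKV_one]
      apply List.map_congr_left; intro a _
      by_cases h : PySem.List.pyGetD cartas a 0 > PySem.List.pyGetD cartas (a + 1) 0
      · rw [if_pos h, max_eq_left h.le]
      · rw [if_neg h, max_eq_right (not_lt.1 h)]
    rw [hp, List.take_zero, List.append_nil, hkv2, e1, e2]

-- --- one step of A's inner loop preserves the invariant ---

theorem pvInv_step (cartas : List Int) (k t : Nat) (hn : k + 2 + t < cartas.length)
    (st : PySem.Dict (Int × Int) Int × PySem.Dict (Int × Int) Int)
    (h : pvInv cartas (k + 2) t st) :
    pvInv cartas (k + 2) (t + 1)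
      (pvA_body cartas ((k : Int) + 2) st ((k : Int) + 2 + (t : Int))) := by
  obtain ⟨hpos, hsuma⟩ := h
  have hrowlen : t < (pvRow cartas (k + 2)).length := by
    rw [pvRow_length' _ _ (by omega)]; omega
  have hl1 : st.2.getD ((t : Int) + 2, (k : Int) + 2 + (t : Int)) 0
      = ((pvRow cartas k).getD (t + 2) (0, 0)).2 := by
    have hx := pv_getD_canonical cartas (k + 2) t st.2 hsuma k (t + 2)
      (Or.inl ⟨by omega, by omega⟩)
    rw [show (((t : Int)) + 2, ((k : Int)) + 2 + ((t : Int)))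
      = ((((t + 2 : Nat)) : Int), (((t + 2 : Nat)) : Int) + ((k : Nat) : Int)) by
        simp [Prod.ext_iff]; omega]
    exact hx
  have hl2 : st.2.getD ((t : Int) + 1, (k : Int) + 2 + (t : Int) - 1) 0
      = ((pvRow cartas k).getD (t + 1) (0, 0)).2 := by
    have hx := pv_getD_canonical cartas (k + 2) t st.2 hsuma k (t + 1)
      (Or.inl ⟨by omega, by omega⟩)
    rw [show (((t : Int)) + 1, ((k : Int)) + 2 + ((t : Int)) - 1)
      = ((((t + 1 : Nat)) : Int), (((t + 1 : Nat)) : Int) + ((k : Nat) : Int)) by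
        simp [Prod.ext_iff]; omega]
    exact hx
  have hl3 : st.2.getD ((t : Int), (k : Int) + 2 + (t : Int) - 2) 0
      = ((pvRow cartas k).getD t (0, 0)).2 := by
    have hx := pv_getD_canonical cartas (k + 2) t st.2 hsuma k t
      (Or.inl ⟨by omega, by omega⟩)
    rw [show (((t : Int)), ((k : Int)) + 2 + ((t : Int)) - 2)
      = (((t : Nat) : Int), ((t : Nat) : Int) + ((k : Nat) : Int)) by
        simp [Prod.ext_iff]; omega]
    exact hx
  set SP : Int := PySem.List.pyGetD cartas ((t : Int)) 0 +
    min (((pvRow cartas k).getD (t + 2) (0, 0)).2) (((pvRow cartas k).getD (t + 1) (0, 0)).2)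
    with hSP
  set SU : Int := PySem.List.pyGetD cartas ((k : Int) + 2 + (t : Int)) 0 +
    min (((pvRow cartas k).getD (t + 1) (0, 0)).2) (((pvRow cartas k).getD t (0, 0)).2)
    with hSU
  set K : Int × Int := (((t : Int)), ((k : Int)) + 2 + ((t : Int))) with hK
  have hb : pvA_body cartas ((k : Int) + 2) st ((k : Int) + 2 + (t : Int))
      = if SP > SU then (st.1.insert K ((t : Int)), st.2.insert K SP)
        else (st.1.insert K ((k : Int) + 2 + (t : Int)), st.2.insert K SU) := by
    simp only [pvA_body]
    rw [show ((k : Int)) + 2 + ((t : Int)) - (((k : Int)) + 2) = ((t : Int)) by ring]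
    rw [hl1, hl2, hl3]
  have hcell : (pvRow cartas (k + 2)).getD t (0, 0)
      = (if SP > SU then (((t : Int)), SP) else (((t : Int)) + ((k : Int)) + 2, SU)) := by
    rw [pvRow_getD_two cartas k t (by omega),
      show ((t : Int)) + (k : Int) + 2 = ((k : Int)) + 2 + ((t : Int)) by ring]
  have hKalt : K = (((t : Nat) : Int), ((t : Nat) : Int) + (((k + 2 : Nat)) : Int)) := by
    simp [hK, Prod.ext_iff]; omega
  have hnc1 : st.1.contains K = false := by
    rw [hKalt]; exact pv_not_contains Prod.fst cartas (k + 2) t st.1 hpos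
  have hnc2 : st.2.contains K = false := by
    rw [hKalt]; exact pv_not_contains Prod.snd cartas (k + 2) t st.2 hsuma
  have htake : ∀ f : Int × Int → Int, (pvRowKV f cartas (k + 2)).take (t + 1)
      = (pvRowKV f cartas (k + 2)).take t
        ++ [(K, f (if SP > SU then (((t : Int)), SP) else (((t : Int)) + ((k : Int)) + 2, SU)))] := by
    intro f
    rw [pvTake_succ f cartas (k + 2) t hrowlen, hcell]
    refine congrArg (fun x => _ ++ [x]) (congrArg₂ Prod.mk hKalt.symm rfl)
  constructor
  · show (pvA_body cartas ((k : Int) + 2) st ((k : Int) + 2 + (t : Int))).1.items = _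
    by_cases hc : SP > SU
    · rw [hb, if_pos hc, htake Prod.fst, if_pos hc,
        PySem.Dict.items_insert_of_not_contains _ _ hnc1, hpos, List.append_assoc]
    · rw [hb, if_neg hc, htake Prod.fst, if_neg hc,
        PySem.Dict.items_insert_of_not_contains _ _ hnc1, hpos, List.append_assoc,
        show ((k : Int)) + 2 + ((t : Int)) = ((t : Int)) + ((k : Int)) + 2 by ring]
  · show (pvA_body cartas ((k : Int) + 2) st ((k : Int) + 2 + (t : Int))).2.items = _
    by_cases hc : SP > SU
    · rw [hb, if_pos hc, htake Prod.snd, if_pos hc,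
        PySem.Dict.items_insert_of_not_contains _ _ hnc2, hsuma, List.append_assoc]
    · rw [hb, if_neg hc, htake Prod.snd, if_neg hc,
        PySem.Dict.items_insert_of_not_contains _ _ hnc2, hsuma, List.append_assoc]

-- --- the inner loop, the outer loop, and A's final items ---

theorem pvInv_inner (cartas : List Int) (k : Nat) :
    ∀ t : Nat, k + 2 + t ≤ cartas.length →
    ∀ st, pvInv cartas (k + 2) 0 st →
    pvInv cartas (k + 2) t
      ((PySem.List.pyRange ((k : Int) + 2) ((k : Int) + 2 + (t : Int)) 1).foldl
        (pvA_body cartas ((k : Int) + 2)) st) := by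
  intro t
  induction t with
  | zero =>
    intro _ st hst
    rw [show ((k : Int) + 2 + (((0 : Nat)) : Int)) = (k : Int) + 2 by norm_num,
      PySem.List.pyRange_one_eq_nil (le_refl _), List.foldl_nil]
    exact hst
  | succ t ih =>
    intro hle st hst
    have hsplit : PySem.List.pyRange ((k : Int) + 2) ((k : Int) + 2 + (((t + 1 : Nat)) : Int)) 1
        = PySem.List.pyRange ((k : Int) + 2) ((k : Int) + 2 + (t : Int)) 1
          ++ [(k : Int) + 2 + (t : Int)] := by
      rw [show ((k : Int) + 2 + (((t + 1 : Nat)) : Int)) = ((k : Int) + 2 + (t : Int)) + 1 by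
        push_cast; ring]
      exact PySem.List.pyRange_one_succ_right (by omega)
    rw [hsplit, List.foldl_append, List.foldl_cons, List.foldl_nil]
    exact pvInv_step cartas k t (by omega) _ (ih (by omega) st hst)

theorem pvInv_roll (cartas : List Int) (m : Nat) (hm : m ≤ cartas.length)
    (st : PySem.Dict (Int × Int) Int × PySem.Dict (Int × Int) Int)
    (h : pvInv cartas m (cartas.length - m) st) : pvInv cartas (m + 1) 0 st := by
  obtain ⟨hpos, hsuma⟩ := h
  constructor
  · rw [hpos, pvKV_succ, List.take_zero, List.append_nil, List.take_of_length_le]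
    rw [pvRowKV_length, pvRow_length' _ _ hm]
  · rw [hsuma, pvKV_succ, List.take_zero, List.append_nil, List.take_of_length_le]
    rw [pvRowKV_length, pvRow_length' _ _ hm]

theorem pvA_outer (cartas : List Int) :
    ∀ s : Nat, 2 + s ≤ cartas.length →
    pvInv cartas (2 + s) 0
      ((PySem.List.pyRange 2 (((2 + s : Nat)) : Int) 1).foldl
        (fun st dif =>
          (PySem.List.pyRange dif (cartas.length : Int) 1).foldl (pvA_body cartas dif) st)
        (pvA_loop2 cartas (pvA_loop1 cartas))) := by
  intro s
  induction s with
  | zero =>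
    intro h2
    rw [show (((2 + 0 : Nat)) : Int) = 2 by norm_num,
      PySem.List.pyRange_one_eq_nil (le_refl _), List.foldl_nil]
    exact pvInv_base cartas (by omega)
  | succ s ih =>
    intro hle
    have hsplit : PySem.List.pyRange 2 (((2 + (s + 1) : Nat)) : Int) 1
        = PySem.List.pyRange 2 (((2 + s : Nat)) : Int) 1 ++ [((2 + s : Nat) : Int)] := by
      rw [show (((2 + (s + 1) : Nat)) : Int) = (((2 + s : Nat)) : Int) + 1 by push_cast; ring]
      exact PySem.List.pyRange_one_succ_right (by push_cast; omega)
    rw [hsplit, List.foldl_append, List.foldl_cons, List.foldl_nil]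
    have hprev := ih (by omega)
    rw [show (2 + s) = s + 2 by omega] at hprev
    have hres := pvInv_inner cartas s (cartas.length - (s + 2)) (by omega) _ hprev
    rw [show ((s : Int) + 2 + ((cartas.length - (s + 2) : Nat) : Int)) = (cartas.length : Int) by
      omega] at hres
    have hroll := pvInv_roll cartas (s + 2) (by omega) _ hres
    rw [show (s + 2 + 1) = 2 + (s + 1) by omega] at hroll
    rw [show (((2 + s : Nat)) : Int) = (s : Int) + 2 by push_cast; ring]
    exact hroll

theorem pvA_eq_ge2 (cartas : List Int) (h2 : 2 ≤ cartas.length) :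
    orden_de_la_mejor_carta_posible cartas
      = (pvKV Prod.fst cartas cartas.length).map (fun p => (p.1.1, p.1.2, p.2)) := by
  have h := pvA_outer cartas (cartas.length - 2) (by omega)
  rw [show (((2 + (cartas.length - 2) : Nat)) : Int) = (cartas.length : Int) by omega,
    show 2 + (cartas.length - 2) = cartas.length by omega] at h
  obtain ⟨hpos, _⟩ := h
  simp only [orden_de_la_mejor_carta_posible]
  rw [hpos, List.take_zero, List.append_nil]

-- --- port B: mejor's memo hits and fresh computations ---

theorem pvMejor_hit (cartas : List Int) (d : Nat) (i : Int)
    (st : PySem.Dict (Int × Int) Int × PySem.Dict (Int × Int) Int)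
    (h : st.2.contains (i, i + (d : Int)) = true) :
    pvMejor cartas d i st = (st.2.getD (i, i + (d : Int)) 0, st) := by
  match d with
  | 0 => simp only [pvMejor, h]; rfl
  | 1 => simp only [pvMejor, h]; rfl
  | k + 2 => simp only [pvMejor, h]; rfl

-- inserting the canonical cell (t, t+m) into both dicts advances the invariant
theorem pvInv_insert (cartas : List Int) (m t : Nat)
    (hrowlen : t < (pvRow cartas m).length)
    (st : PySem.Dict (Int × Int) Int × PySem.Dict (Int × Int) Int)
    (hpos : st.1.items = pvKV Prod.fst cartas m ++ (pvRowKV Prod.fst cartas m).take t)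
    (hsuma : st.2.items = pvKV Prod.snd cartas m ++ (pvRowKV Prod.snd cartas m).take t)
    (p s : Int) (hcell : (pvRow cartas m).getD t (0, 0) = (p, s)) :
    pvInv cartas m (t + 1)
      (st.1.insert ((t : Int), (t : Int) + (m : Int)) p,
       st.2.insert ((t : Int), (t : Int) + (m : Int)) s) := by
  have hg1 : st.1.contains ((t : Int), (t : Int) + (m : Int)) = false :=
    pv_not_contains Prod.fst cartas m t st.1 hpos
  have hg2 : st.2.contains ((t : Int), (t : Int) + (m : Int)) = false :=
    pv_not_contains Prod.snd cartas m t st.2 hsuma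
  constructor
  · show (st.1.insert _ p).items = _
    rw [PySem.Dict.items_insert_of_not_contains _ _ hg1, hpos,
      pvTake_succ Prod.fst cartas m t hrowlen, hcell, List.append_assoc]
  · show (st.2.insert _ s).items = _
    rw [PySem.Dict.items_insert_of_not_contains _ _ hg2, hsuma,
      pvTake_succ Prod.snd cartas m t hrowlen, hcell, List.append_assoc]

-- one driver call mejor(t, t+m) on a fresh cell advances the invariant
theorem pvInvB_step (cartas : List Int) (m t : Nat) (hn : t + m < cartas.length)
    (st : PySem.Dict (Int × Int) Int × PySem.Dict (Int × Int) Int)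
    (h : pvInv cartas m t st) :
    pvInv cartas m (t + 1) (pvMejor cartas m ((t : Int)) st).2 := by
  obtain ⟨hpos, hsuma⟩ := h
  have hrowlen : t < (pvRow cartas m).length := by
    rw [pvRow_length' _ _ (by omega)]; omega
  have hg2 : st.2.contains ((t : Int), (t : Int) + (m : Int)) = false :=
    pv_not_contains Prod.snd cartas m t st.2 hsuma
  match m, hn, hrowlen, hsuma, hg2 with
  | 0, hn, hrowlen, hsuma, hg2 =>
    have hcell : (pvRow cartas 0).getD t (0, 0)
        = (((t : Int)), PySem.List.pyGetD cartas ((t : Int)) 0) := by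
      rw [List.getD_eq_getElem _ _ hrowlen]
      have hin : t < cartas.length := by omega
      rw [PySem.List.pyGetD_natCast, List.getD_eq_getElem _ _ hin]
      simp [pvRow, PySem.List.getElem_enumerate]
    have he : pvMejor cartas 0 ((t : Int)) st
        = (PySem.List.pyGetD cartas ((t : Int)) 0,
           (st.1.insert ((t : Int), (t : Int) + ((0 : Nat) : Int)) ((t : Int)),
            st.2.insert ((t : Int), (t : Int) + ((0 : Nat) : Int))
              (PySem.List.pyGetD cartas ((t : Int)) 0))) := by
      simp only [pvMejor, hg2, Bool.false_eq_true, if_false]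
    rw [he]
    exact pvInv_insert cartas 0 t hrowlen st hpos hsuma _ _ hcell
  | 1, hn, hrowlen, hsuma, hg2 =>
    have hcell : (pvRow cartas 1).getD t (0, 0)
        = (if PySem.List.pyGetD cartas ((t : Int)) 0 > PySem.List.pyGetD cartas ((t : Int) + 1) 0
           then (((t : Int)), PySem.List.pyGetD cartas ((t : Int)) 0)
           else (((t : Int)) + 1, PySem.List.pyGetD cartas ((t : Int) + 1) 0)) := by
      rw [List.getD_eq_getElem _ _ hrowlen, pv_row1_getElem cartas t hrowlen]
    have he : pvMejor cartas 1 ((t : Int)) st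
        = ((if PySem.List.pyGetD cartas ((t : Int)) 0 > PySem.List.pyGetD cartas ((t : Int) + 1) 0
            then (((t : Int)), PySem.List.pyGetD cartas ((t : Int)) 0)
            else (((t : Int)) + 1, PySem.List.pyGetD cartas ((t : Int) + 1) 0)).2,
           (st.1.insert ((t : Int), (t : Int) + ((1 : Nat) : Int))
              (if PySem.List.pyGetD cartas ((t : Int)) 0 > PySem.List.pyGetD cartas ((t : Int) + 1) 0
               then (((t : Int)), PySem.List.pyGetD cartas ((t : Int)) 0)
               else (((t : Int)) + 1, PySem.List.pyGetD cartas ((t : Int) + 1) 0)).1,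
            st.2.insert ((t : Int), (t : Int) + ((1 : Nat) : Int))
              (if PySem.List.pyGetD cartas ((t : Int)) 0 > PySem.List.pyGetD cartas ((t : Int) + 1) 0
               then (((t : Int)), PySem.List.pyGetD cartas ((t : Int)) 0)
               else (((t : Int)) + 1, PySem.List.pyGetD cartas ((t : Int) + 1) 0)).2)) := by
      simp only [pvMejor, hg2, Bool.false_eq_true, if_false]
    rw [he]
    exact pvInv_insert cartas 1 t hrowlen st hpos hsuma _ _ hcell
  | k + 2, hn, hrowlen, hsuma, hg2 =>
    -- the four recursive calls are memo hits on diagonal k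
    have hct2 : st.2.contains ((t : Int) + 2, (t : Int) + 2 + (k : Int)) = true := by
      have hx := pv_contains_canonical Prod.snd cartas (k + 2) t st.2 hsuma k (t + 2)
        (Or.inl ⟨by omega, by omega⟩)
      rw [show ((((t + 2 : Nat)) : Int), (((t + 2 : Nat)) : Int) + ((k : Nat) : Int))
        = (((t : Int)) + 2, ((t : Int)) + 2 + ((k : Int))) by simp] at hx
      exact hx
    have hct1 : st.2.contains ((t : Int) + 1, (t : Int) + 1 + (k : Int)) = true := by
      have hx := pv_contains_canonical Prod.snd cartas (k + 2) t st.2 hsuma k (t + 1)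
        (Or.inl ⟨by omega, by omega⟩)
      rw [show ((((t + 1 : Nat)) : Int), (((t + 1 : Nat)) : Int) + ((k : Nat) : Int))
        = (((t : Int)) + 1, ((t : Int)) + 1 + ((k : Int))) by simp] at hx
      exact hx
    have hct0 : st.2.contains ((t : Int), (t : Int) + (k : Int)) = true :=
      pv_contains_canonical Prod.snd cartas (k + 2) t st.2 hsuma k t
        (Or.inl ⟨by omega, by omega⟩)
    have hv2 : st.2.getD ((t : Int) + 2, (t : Int) + 2 + (k : Int)) 0
        = ((pvRow cartas k).getD (t + 2) (0, 0)).2 := by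
      have hx := pv_getD_canonical cartas (k + 2) t st.2 hsuma k (t + 2)
        (Or.inl ⟨by omega, by omega⟩)
      rw [show ((((t + 2 : Nat)) : Int), (((t + 2 : Nat)) : Int) + ((k : Nat) : Int))
        = (((t : Int)) + 2, ((t : Int)) + 2 + ((k : Int))) by simp] at hx
      exact hx
    have hv1 : st.2.getD ((t : Int) + 1, (t : Int) + 1 + (k : Int)) 0
        = ((pvRow cartas k).getD (t + 1) (0, 0)).2 := by
      have hx := pv_getD_canonical cartas (k + 2) t st.2 hsuma k (t + 1)
        (Or.inl ⟨by omega, by omega⟩)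
      rw [show ((((t + 1 : Nat)) : Int), (((t + 1 : Nat)) : Int) + ((k : Nat) : Int))
        = (((t : Int)) + 1, ((t : Int)) + 1 + ((k : Int))) by simp] at hx
      exact hx
    have hv0 : st.2.getD ((t : Int), (t : Int) + (k : Int)) 0
        = ((pvRow cartas k).getD t (0, 0)).2 :=
      pv_getD_canonical cartas (k + 2) t st.2 hsuma k t (Or.inl ⟨by omega, by omega⟩)
    have hh2 : pvMejor cartas k ((t : Int) + 2) st
        = (((pvRow cartas k).getD (t + 2) (0, 0)).2, st) := by
      rw [pvMejor_hit cartas k ((t : Int) + 2) st hct2, hv2]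
    have hh1 : pvMejor cartas k ((t : Int) + 1) st
        = (((pvRow cartas k).getD (t + 1) (0, 0)).2, st) := by
      rw [pvMejor_hit cartas k ((t : Int) + 1) st hct1, hv1]
    have hh0 : pvMejor cartas k ((t : Int)) st
        = (((pvRow cartas k).getD t (0, 0)).2, st) := by
      rw [pvMejor_hit cartas k ((t : Int)) st hct0, hv0]
    have hcell : (pvRow cartas (k + 2)).getD t (0, 0)
        = (if PySem.List.pyGetD cartas ((t : Int)) 0 +
              min ((pvRow cartas k).getD (t + 2) (0, 0)).2 ((pvRow cartas k).getD (t + 1) (0, 0)).2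
            > PySem.List.pyGetD cartas ((t : Int) + (((k + 2 : Nat)) : Int)) 0 +
              min ((pvRow cartas k).getD (t + 1) (0, 0)).2 ((pvRow cartas k).getD t (0, 0)).2
           then (((t : Int)), PySem.List.pyGetD cartas ((t : Int)) 0 +
              min ((pvRow cartas k).getD (t + 2) (0, 0)).2 ((pvRow cartas k).getD (t + 1) (0, 0)).2)
           else (((t : Int)) + (((k + 2 : Nat)) : Int),
              PySem.List.pyGetD cartas ((t : Int) + (((k + 2 : Nat)) : Int)) 0 +
              min ((pvRow cartas k).getD (t + 1) (0, 0)).2 ((pvRow cartas k).getD t (0, 0)).2)) := by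
      rw [pvRow_getD_two cartas k t (by omega),
        show ((t : Int)) + ((k : Int)) + 2 = ((t : Int)) + (((k + 2 : Nat)) : Int) by push_cast; ring]
    have he : pvMejor cartas (k + 2) ((t : Int)) st
        = ((if PySem.List.pyGetD cartas ((t : Int)) 0 +
              min ((pvRow cartas k).getD (t + 2) (0, 0)).2 ((pvRow cartas k).getD (t + 1) (0, 0)).2
            > PySem.List.pyGetD cartas ((t : Int) + (((k + 2 : Nat)) : Int)) 0 +
              min ((pvRow cartas k).getD (t + 1) (0, 0)).2 ((pvRow cartas k).getD t (0, 0)).2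
            then (((t : Int)), PySem.List.pyGetD cartas ((t : Int)) 0 +
              min ((pvRow cartas k).getD (t + 2) (0, 0)).2 ((pvRow cartas k).getD (t + 1) (0, 0)).2)
            else (((t : Int)) + (((k + 2 : Nat)) : Int),
              PySem.List.pyGetD cartas ((t : Int) + (((k + 2 : Nat)) : Int)) 0 +
              min ((pvRow cartas k).getD (t + 1) (0, 0)).2 ((pvRow cartas k).getD t (0, 0)).2)).2,
           (st.1.insert ((t : Int), (t : Int) + (((k + 2 : Nat)) : Int))
              (if PySem.List.pyGetD cartas ((t : Int)) 0 +
                min ((pvRow cartas k).getD (t + 2) (0, 0)).2 ((pvRow cartas k).getD (t + 1) (0, 0)).2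
               > PySem.List.pyGetD cartas ((t : Int) + (((k + 2 : Nat)) : Int)) 0 +
                min ((pvRow cartas k).getD (t + 1) (0, 0)).2 ((pvRow cartas k).getD t (0, 0)).2
               then (((t : Int)), PySem.List.pyGetD cartas ((t : Int)) 0 +
                min ((pvRow cartas k).getD (t + 2) (0, 0)).2 ((pvRow cartas k).getD (t + 1) (0, 0)).2)
               else (((t : Int)) + (((k + 2 : Nat)) : Int),
                PySem.List.pyGetD cartas ((t : Int) + (((k + 2 : Nat)) : Int)) 0 +
                min ((pvRow cartas k).getD (t + 1) (0, 0)).2 ((pvRow cartas k).getD t (0, 0)).2)).1,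
            st.2.insert ((t : Int), (t : Int) + (((k + 2 : Nat)) : Int))
              (if PySem.List.pyGetD cartas ((t : Int)) 0 +
                min ((pvRow cartas k).getD (t + 2) (0, 0)).2 ((pvRow cartas k).getD (t + 1) (0, 0)).2
               > PySem.List.pyGetD cartas ((t : Int) + (((k + 2 : Nat)) : Int)) 0 +
                min ((pvRow cartas k).getD (t + 1) (0, 0)).2 ((pvRow cartas k).getD t (0, 0)).2
               then (((t : Int)), PySem.List.pyGetD cartas ((t : Int)) 0 +
                min ((pvRow cartas k).getD (t + 2) (0, 0)).2 ((pvRow cartas k).getD (t + 1) (0, 0)).2)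
               else (((t : Int)) + (((k + 2 : Nat)) : Int),
                PySem.List.pyGetD cartas ((t : Int) + (((k + 2 : Nat)) : Int)) 0 +
                min ((pvRow cartas k).getD (t + 1) (0, 0)).2 ((pvRow cartas k).getD t (0, 0)).2)).2)) := by
      simp only [pvMejor, hg2, Bool.false_eq_true, if_false, hh2, hh1, hh0]
    rw [he]
    exact pvInv_insert cartas (k + 2) t hrowlen st hpos hsuma _ _ hcell

-- --- B's driver loops ---

theorem pvInvB_inner (cartas : List Int) (m : Nat) :
    ∀ t : Nat, m + t ≤ cartas.length →
    ∀ st, pvInv cartas m 0 st →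
    pvInv cartas m t
      ((PySem.List.pyRange 0 ((t : Int)) 1).foldl
        (fun st i => (pvMejor cartas m i st).2) st) := by
  intro t
  induction t with
  | zero =>
    intro _ st hst
    rw [show (((0 : Nat)) : Int) = 0 by norm_num,
      PySem.List.pyRange_one_eq_nil (le_refl _), List.foldl_nil]
    exact hst
  | succ t ih =>
    intro hle st hst
    have hsplit : PySem.List.pyRange 0 (((t + 1 : Nat)) : Int) 1
        = PySem.List.pyRange 0 ((t : Int)) 1 ++ [(t : Int)] := by
      rw [show (((t + 1 : Nat)) : Int) = ((t : Int)) + 1 by push_cast; ring]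
      exact PySem.List.pyRange_one_succ_right (by omega)
    rw [hsplit, List.foldl_append, List.foldl_cons, List.foldl_nil]
    exact pvInvB_step cartas m t (by omega) _ (ih (by omega) st hst)

theorem pvB_outer (cartas : List Int) :
    ∀ s : Nat, s ≤ cartas.length →
    pvInv cartas s 0
      ((PySem.List.pyRange 0 ((s : Nat) : Int) 1).foldl
        (fun st dif => (PySem.List.pyRange 0 ((cartas.length : Int) - dif) 1).foldl
          (fun st i => (pvMejor cartas dif.toNat i st).2) st)
        (PySem.Dict.empty, PySem.Dict.empty)) := by
  intro s
  induction s with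
  | zero =>
    intro _
    rw [show (((0 : Nat)) : Int) = 0 by norm_num,
      PySem.List.pyRange_one_eq_nil (le_refl _), List.foldl_nil]
    exact ⟨rfl, rfl⟩
  | succ s ih =>
    intro hle
    have hsplit : PySem.List.pyRange 0 (((s + 1 : Nat)) : Int) 1
        = PySem.List.pyRange 0 ((s : Int)) 1 ++ [(s : Int)] := by
      rw [show (((s + 1 : Nat)) : Int) = ((s : Int)) + 1 by push_cast; ring]
      exact PySem.List.pyRange_one_succ_right (by omega)
    rw [hsplit, List.foldl_append, List.foldl_cons, List.foldl_nil]
    have hprev := ih (by omega)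
    have hres := pvInvB_inner cartas s (cartas.length - s) (by omega) _ hprev
    rw [show (((cartas.length - s : Nat)) : Int) = (cartas.length : Int) - ((s : Int)) by omega]
      at hres
    simp only [Int.toNat_natCast]
    exact pvInv_roll cartas s (by omega) _ hres

theorem pvB_eq (cartas : List Int) :
    orden_de_la_mejor_carta_posible_alt cartas
      = (pvKV Prod.fst cartas cartas.length).map (fun p => (p.1.1, p.1.2, p.2)) := by
  have h := pvB_outer cartas cartas.length (le_refl _)
  obtain ⟨hpos, _⟩ := h
  simp only [orden_de_la_mejor_carta_posible_alt]
  rw [hpos, List.take_zero, List.append_nil]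

theorem pv_main (cartas : List Int) :
    orden_de_la_mejor_carta_posible cartas = orden_de_la_mejor_carta_posible_alt cartas := by
  match cartas with
  | [] => rfl
  | [a] =>
    rw [pvB_eq]
    have hr : (pvKV Prod.fst [a] ([a] : List Int).length).map (fun p => (p.1.1, p.1.2, p.2))
        = [((0 : Int), (0 : Int), (0 : Int))] := by
      simp [pvKV, pvRowKV, pvRow, List.range_succ,
        PySem.List.enumerate_cons, PySem.List.enumerate_nil]
    rw [hr]
    simp only [orden_de_la_mejor_carta_posible]
    rw [show (([a] : List Int).length : Int) = 1 by simp,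
      show PySem.List.pyRange 2 (1 : Int) 1 = [] from by decide, List.foldl_nil, pvA_split]
    have h1 : (pvPos1 [a]).items
        = (PySem.List.pyRange 0 (([a] : List Int).length : Int) 1).map (fun i => ((i, i), i)) :=
      pv_loop1_items [a] (fun i => i)
    have h2 : (pvPos2 [a]).items
        = (PySem.List.pyRange 0 (([a] : List Int).length : Int) 1).map (fun i => ((i, i), i))
          ++ (PySem.List.pyRange 0 ((([a] : List Int).length : Int) - 1) 1).map
              (fun i => ((i, i + 1),
                if PySem.List.pyGetD [a] i 0 > PySem.List.pyGetD [a] (i + 1) 0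
                then i else i + 1)) :=
      pv_loop2_items [a] (fun i => i) _ (pvPos1 [a]) h1
    rw [show (([a] : List Int).length : Int) = 1 by simp] at h2
    rw [show PySem.List.pyRange 0 (1 : Int) 1 = [(0 : Int)] from by decide,
      show PySem.List.pyRange 0 ((1 : Int) - 1) 1 = [] from by decide] at h2
    show (pvPos2 [a]).items.map (fun p => (p.1.1, p.1.2, p.2)) = _
    rw [h2]
    rfl
  | a :: b :: tl =>
    have h2 : 2 ≤ (a :: b :: tl).length := by
      have : (a :: b :: tl).length = tl.length + 2 := by simp
      omega
    rw [pvA_eq_ge2 _ h2, pvB_eq]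

-- ===== VERDICT (by name: the statement is the Claim_ definition above) =====
theorem orden_de_la_mejor_carta_posible_spec : Claim_equal_orden_de_la_mejor_carta_posible := by
  intro cartas _
  exact pv_main cartas
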